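-- pv_equiv track=rewrite | github.com/anupam-codespace/hybrid-ai-schema-architect | er_module/relationship_extractor.py | _resolve_entity
-- ===== SOURCE A (Python) =====
-- from typing import Optional
--
-- def _resolve_entity(raw_name: str, known_entities: list) -> Optional[str]:
--     """Match raw extracted name to a known entity (case-insensitive + prefix)."""
--     if not raw_name:
--         return None
--     raw_lower = raw_name.lower()
--     for name in known_entities:
--         if name.lower() == raw_lower:
--             return name
--     for name in known_entities:
--         if name.lower().startswith(raw_lower[:4]) or raw_lower.startswith(name.lower()[:4]):
--             return name
--     return raw_name.capitalize() if raw_name[0].isupper() else None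
-- ===== SOURCE B (Python) =====
-- from typing import Optional
--
-- def _resolve_entity(raw_name: str, known_entities: list) -> Optional[str]:
--     """Match raw extracted name to a known entity (case-insensitive + prefix)."""
--     if not raw_name:
--         return None
--     raw_lower = raw_name.lower()
--     candidate = None
--     for name in known_entities:
--         name_lower = name.lower()
--         if name_lower == raw_lower:
--             return name
--         if candidate is None and (name_lower.startswith(raw_lower[:4])
--                                   or raw_lower.startswith(name_lower[:4])):
--             candidate = name
--     if candidate is not None:
--         return candidate
--     return raw_name.capitalize() if raw_name[0].isupper() else None
-- ===== Notes on version B (the rewrite author's own statement) =====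
-- stated objective: alternative
-- what changed: Replaces A's two sequential scans (exact match, then prefix match) with a single pass that returns an exact match immediately and records only the first prefix candidate as a fallback.
import Mathlib
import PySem

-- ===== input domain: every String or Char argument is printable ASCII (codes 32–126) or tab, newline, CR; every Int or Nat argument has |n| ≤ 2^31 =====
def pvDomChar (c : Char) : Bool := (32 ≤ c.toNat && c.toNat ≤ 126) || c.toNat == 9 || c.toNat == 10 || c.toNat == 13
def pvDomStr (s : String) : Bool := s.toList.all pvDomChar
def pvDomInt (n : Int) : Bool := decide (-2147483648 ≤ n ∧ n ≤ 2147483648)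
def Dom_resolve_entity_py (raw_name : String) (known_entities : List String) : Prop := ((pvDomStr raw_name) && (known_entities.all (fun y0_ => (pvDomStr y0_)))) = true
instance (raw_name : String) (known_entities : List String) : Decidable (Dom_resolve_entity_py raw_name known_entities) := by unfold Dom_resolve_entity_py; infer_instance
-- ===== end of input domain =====

-- B: single pass over known_entities (exact match returns at once, first prefix match kept
-- as fallback) instead of A's two sequential scans; same cost, different decomposition.


-- shared helpers: Python's str.capitalize() (exact on ASCII) and the common fallback line
-- 'raw_name.capitalize() if raw_name[0].isupper() else None' that both Pythons contain verbatim
def pyCapitalize (s : String) : String :=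
  match s.toList with
  | [] => ""
  | c :: cs => String.ofList (PySem.Chars.upperChar c :: cs.map PySem.Chars.lowerChar)

def pyFallback (raw_name : String) : Option String :=
  match raw_name.toList with
  | [] => none
  | c :: _ => if PySem.Chars.isupper c then some (pyCapitalize raw_name) else none

-- the prefix condition 'name.lower().startswith(raw_lower[:4]) or raw_lower.startswith(name.lower()[:4])'
def prefCond (raw_lower name : String) : Bool :=
  PySem.Str.startswith (PySem.Str.lower name) (PySem.Str.slice raw_lower none (some 4)) ||
  PySem.Str.startswith raw_lower (PySem.Str.slice (PySem.Str.lower name) none (some 4))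

-- ===== PORT A =====
def resolve_entity_py (raw_name : String) (known_entities : List String) : Option String :=
  if raw_name = "" then none
  else
    let raw_lower := PySem.Str.lower raw_name
    match known_entities.find? (fun name => PySem.Str.lower name == raw_lower) with
    | some name => some name
    | none =>
      match known_entities.find? (fun name => prefCond raw_lower name) with
      | some name => some name
      | none => pyFallback raw_name

-- ===== PORT B =====
def altLoop (raw_name raw_lower : String) : List String → Option String → Option String
  | [], candidate =>
      match candidate with
      | some c => some c
      | none => pyFallback raw_name
  | name :: rest, candidate =>
      if PySem.Str.lower name == raw_lower then some name
      else if candidate.isNone && prefCond raw_lower name then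
        altLoop raw_name raw_lower rest (some name)
      else
        altLoop raw_name raw_lower rest candidate

def resolve_entity_py_alt (raw_name : String) (known_entities : List String) : Option String :=
  if raw_name = "" then none
  else altLoop raw_name (PySem.Str.lower raw_name) known_entities none

-- ===== PRECONDITION & SPEC =====
def Spec_resolve_entity_py (raw_name : String) (known_entities : List String) (out : Option String) : Prop := out = resolve_entity_py_alt raw_name known_entities
instance (raw_name : String) (known_entities : List String) (out : Option String) : Decidable (Spec_resolve_entity_py raw_name known_entities out) := by unfold Spec_resolve_entity_py; infer_instance

-- ===== CLAIM (what is proved, stated in full; the proofs are below) =====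
def Claim_equal_resolve_entity_py : Prop := ∀ (raw_name : String) (known_entities : List String), Dom_resolve_entity_py raw_name known_entities → Spec_resolve_entity_py raw_name known_entities (resolve_entity_py raw_name known_entities)

-- ===== LEMMAS AND PROOFS =====

-- characterisation of B's loop in terms of A's two scans
theorem altLoop_eq (raw_name raw_lower : String) (l : List String) (cand : Option String) :
    altLoop raw_name raw_lower l cand =
      match l.find? (fun name => PySem.Str.lower name == raw_lower) with
      | some name => some name
      | none =>
        match cand with
        | some c => some c
        | none =>
          match l.find? (fun name => prefCond raw_lower name) with
          | some name => some name
          | none => pyFallback raw_name := by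
  induction l generalizing cand with
  | nil => cases cand <;> simp [altLoop]
  | cons name rest ih =>
    by_cases hx : (PySem.Str.lower name == raw_lower) = true
    · simp [altLoop, hx, List.find?]
    · rw [Bool.not_eq_true] at hx
      cases cand with
      | some c =>
        simp only [altLoop, hx, Bool.false_eq_true, if_false, Option.isNone_some,
          Bool.false_and, ih]
        simp [List.find?, hx]
      | none =>
        by_cases hp : prefCond raw_lower name = true
        · simp only [altLoop, hx, Bool.false_eq_true, if_false, Option.isNone_none,
            Bool.true_and, hp, if_true, ih]
          simp [List.find?, hx, hp]
        · simp only [altLoop, hx, Bool.false_eq_true, if_false, Option.isNone_none,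
            Bool.true_and, hp, ih]
          simp [List.find?, hx, hp]

-- ===== VERDICT (by name: the statement is the Claim_ definition above) =====
theorem resolve_entity_py_spec : Claim_equal_resolve_entity_py := by
  intro raw_name known_entities _
  unfold Spec_resolve_entity_py resolve_entity_py resolve_entity_py_alt
  by_cases h : raw_name = ""
  · simp [h]
  · simp [h, altLoop_eq]
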